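-- pv_equiv track=rewrite | github.com/biosp4rk/mf-zm-info | tools/decomp/ident_formatter.py | desc_from_ident
-- ===== SOURCE A (Python) =====
-- from typing import Callable, List
--
-- ALL_CAPS = {
--     "bg", "bldy", "io", "oam", "ram", "sram", "x", "y"
-- }
--
-- CAPITALIZE = {
--     "metroid", "ridley", "samus"
-- }
--
-- class IdentSplitter:
--     def __init__(self):
--         self.ident = None
--         self.idx = None
--         self.word = None
--
--     def split(self, ident: str) -> List[str]:
--         self.ident = ident
--         self.idx = 0
--         words = []
--         while self.idx < len(self.ident):
--             c = self.ident[self.idx]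
--             self.idx += 1
--             self.word = [c]
--             if "0" <= c <= "9":
--                 self.get_while(self.is_digit)
--             elif "A" <= c <= "Z":
--                 self.get_while(self.is_lower)
--             elif "a" <= c <= "z":
--                 self.get_while(self.is_lower)
--             elif c == "_":
--                 self.skip_while(self.is_underscore)
--             else:
--                 raise ValueError(f"Invalid identifier char '{c}'")
--             words.append("".join(self.word))
--         return words
--
--     @staticmethod
--     def is_digit(c: str) -> bool:
--         return "0" <= c <= "9"
--
--     @staticmethod
--     def is_upper(c: str) -> bool:
--         return "A" <= c <= "Z"
--
--     @staticmethod
--     def is_lower(c: str) -> bool: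
--         return "a" <= c <= "z"
--
--     @staticmethod
--     def is_underscore(c: str) -> bool:
--         return c == "_"
--
--     def get_while(self, cond: Callable[[str], bool]) -> None:
--         while self.idx < len(self.ident) and cond(self.ident[self.idx]):
--             self.word.append(self.ident[self.idx])
--             self.idx += 1
--
--     def skip_while(self, cond: Callable[[str], bool]) -> None:
--         while self.idx < len(self.ident) and cond(self.ident[self.idx]):
--             self.idx += 1
--
-- def desc_from_ident(ident: str) -> str:
--     words = IdentSplitter().split(ident)
--     words = [w.lower() for w in words if w != "_"]
--     for i in range(len(words)):
--         word = words[i]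
--         if word in ALL_CAPS:
--             words[i] = word.upper()
--         elif word in CAPITALIZE:
--             words[i] = word.capitalize()
--     first = words[0]
--     words[0] = first[0].upper() + first[1:]
--     return " ".join(words)
-- ===== SOURCE B (Python) =====
-- import re
--
-- ALL_CAPS = {
--     "bg", "bldy", "io", "oam", "ram", "sram", "x", "y"
-- }
--
-- CAPITALIZE = {
--     "metroid", "ridley", "samus"
-- }
--
-- _TOKEN = re.compile(r"[0-9]+|[A-Za-z][a-z]*|_+")
--
-- def _fmt(word: str) -> str:
--     if word in ALL_CAPS:
--         return word.upper()
--     if word in CAPITALIZE: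
--         return word.capitalize()
--     return word
--
-- def desc_from_ident(ident: str) -> str:
--     tokens = _TOKEN.findall(ident)
--     if sum(map(len, tokens)) != len(ident):
--         raise ValueError(f"Invalid identifier {ident!r}")
--     words = [_fmt(t.lower()) for t in tokens if t[0] != "_"]
--     first = words[0]
--     return " ".join([first[0].upper() + first[1:]] + words[1:])
-- ===== Notes on version B (the rewrite author's own statement) =====
-- stated objective: idiomatic
-- what changed: Replaces the stateful IdentSplitter class (explicit index cursor, mutable word buffer, in-place mutation loop) with a regex tokenization (re.findall of digit runs / letter+lowercase runs / underscore runs, plus a coverage check for invalid chars) and a single comprehension that filters underscores and formats each word; the C-level regex scan replaces A's per-character Python loop.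
import Mathlib
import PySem

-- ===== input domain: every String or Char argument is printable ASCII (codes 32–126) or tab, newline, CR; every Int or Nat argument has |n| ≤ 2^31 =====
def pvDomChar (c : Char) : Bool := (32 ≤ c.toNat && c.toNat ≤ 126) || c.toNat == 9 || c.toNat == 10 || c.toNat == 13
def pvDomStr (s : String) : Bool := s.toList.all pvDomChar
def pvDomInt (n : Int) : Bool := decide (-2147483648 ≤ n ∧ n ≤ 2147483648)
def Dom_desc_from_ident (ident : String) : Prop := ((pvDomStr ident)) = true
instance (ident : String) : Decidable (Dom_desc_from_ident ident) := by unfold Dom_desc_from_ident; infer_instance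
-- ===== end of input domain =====

-- B replaces A's stateful index-cursor splitter class with a regex-style tokenizer
-- (findall of digit/letter/underscore runs + coverage check) and one formatting pass (idiomatic; measured faster by a constant factor).


-- ===== PORT A =====
-- char-class predicates of IdentSplitter
def pvIsDigit (c : Char) : Bool := '0' ≤ c && c ≤ '9'
def pvIsUpper (c : Char) : Bool := 'A' ≤ c && c ≤ 'Z'
def pvIsLower (c : Char) : Bool := 'a' ≤ c && c ≤ 'z'
def pvIsUnderscore (c : Char) : Bool := c == '_'

-- the ALL_CAPS / CAPITALIZE module sets
def pvAllCaps : PySem.Set (List Char) :=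
  PySem.Set.ofList ["bg".toList, "bldy".toList, "io".toList, "oam".toList,
                    "ram".toList, "sram".toList, "x".toList, "y".toList]
def pvCapitalize : PySem.Set (List Char) :=
  PySem.Set.ofList ["metroid".toList, "ridley".toList, "samus".toList]

-- IdentSplitter.split: the while-loop over self.idx becomes recursion on the remaining
-- suffix; get_while's appending loop is takeWhile/dropWhile over the same suffix.
def pvSplitA : List Char → List (List Char)
  | [] => []
  | c :: rest =>
    if pvIsDigit c then
      (c :: rest.takeWhile pvIsDigit) :: pvSplitA (rest.dropWhile pvIsDigit)
    else if pvIsUpper c then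
      (c :: rest.takeWhile pvIsLower) :: pvSplitA (rest.dropWhile pvIsLower)
    else if pvIsLower c then
      (c :: rest.takeWhile pvIsLower) :: pvSplitA (rest.dropWhile pvIsLower)
    else if pvIsUnderscore c then
      ['_'] :: pvSplitA (rest.dropWhile pvIsUnderscore)
    else
      []  -- Python raises ValueError here; such inputs are outside Pre_
termination_by l => l.length
decreasing_by all_goals simp; exact List.length_dropWhile_le _ _

-- str.capitalize on an already produced word (first upper, rest lowered)
def pvCapWordA (w : List Char) : List Char :=
  match w with
  | [] => []
  | c :: cs => PySem.Chars.upperChar c :: PySem.Chars.lower cs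

def desc_from_ident (ident : String) : String :=
  let words0 := pvSplitA ident.toList
  -- words = [w.lower() for w in words if w != "_"]
  let words1 := (words0.filter (fun w => w ≠ ['_'])).map PySem.Chars.lower
  -- the in-place for-loop over range(len(words)) rewriting words[i]
  let words2 := words1.map (fun w =>
    if w ∈ pvAllCaps then PySem.Chars.upper w
    else if w ∈ pvCapitalize then pvCapWordA w
    else w)
  -- words[0] = first[0].upper() + first[1:]
  match words2 with
  | [] => ""  -- Python raises IndexError here; such inputs are outside Pre_
  | w :: ws =>
      String.ofList (PySem.Chars.join [' ']
        ((match w with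
          | [] => []  -- unreachable: split produces nonempty words
          | c :: cs => PySem.Chars.upperChar c :: cs) :: ws))

-- ===== PORT B =====
-- one regex match attempt of r"[0-9]+|[A-Za-z][a-z]*|_+" at the current position:
-- the matched token and the rest of the string
def pvMatchTok : List Char → Option (List Char × List Char)
  | [] => none
  | c :: rest =>
    if pvIsDigit c then some (c :: rest.takeWhile pvIsDigit, rest.dropWhile pvIsDigit)
    else if pvIsUpper c || pvIsLower c then
      some (c :: rest.takeWhile pvIsLower, rest.dropWhile pvIsLower)
    else if pvIsUnderscore c then some (c :: rest.takeWhile pvIsUnderscore, rest.dropWhile pvIsUnderscore)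
    else none

-- re.findall: emit each match, skip a character where nothing matches
def pvFindAll : List Char → List (List Char)
  | [] => []
  | c :: rest =>
    match h : pvMatchTok (c :: rest) with
    | some (t, rest') => t :: pvFindAll rest'
    | none => pvFindAll rest
termination_by l => l.length
decreasing_by
  · simp only [pvMatchTok] at h
    split_ifs at h <;>
      (injection h with h1; injection h1 with _ h2; rw [← h2];
       simpa using Nat.lt_succ_of_le (List.length_dropWhile_le _ _))
  · simp

def pvFmt (w : List Char) : List Char :=
  if w ∈ pvAllCaps then PySem.Chars.upper w
  else if w ∈ pvCapitalize then pvCapWordA w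
  else w

def desc_from_ident_alt (ident : String) : String :=
  let tokens := pvFindAll ident.toList
  if (tokens.map List.length).sum ≠ ident.toList.length then
    ""  -- Source B raises ValueError here; such inputs are outside Pre_
  else
    let words := (tokens.filter (fun t => t.headD ' ' ≠ '_')).map
      (fun t => pvFmt (PySem.Chars.lower t))
    match words with
    | [] => ""  -- Source B raises IndexError here; such inputs are outside Pre_
    | w :: ws =>
        String.ofList (PySem.Chars.join [' ']
          ((match w with
            | [] => []  -- unreachable: tokens are nonempty
            | c :: cs => PySem.Chars.upperChar c :: cs) :: ws))

-- ===== PRECONDITION & SPEC =====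
-- Pre_ excludes exactly the inputs where A raises: a character outside [0-9A-Za-z_]
-- (ValueError), and strings with no alphanumeric character (IndexError on words[0]).
def Pre_desc_from_ident (ident : String) : Prop :=
  ident.toList.all (fun c => pvIsDigit c || pvIsUpper c || pvIsLower c || pvIsUnderscore c) = true ∧
  ident.toList.any (fun c => !pvIsUnderscore c) = true
instance (ident : String) : Decidable (Pre_desc_from_ident ident) := by
  unfold Pre_desc_from_ident; infer_instance
def pvWitness_desc_from_ident : String := "samus_x_pos"
def Spec_desc_from_ident (ident : String) (out : String) : Prop := out = desc_from_ident_alt ident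
instance (ident : String) (out : String) : Decidable (Spec_desc_from_ident ident out) := by unfold Spec_desc_from_ident; infer_instance

-- ===== CLAIM (what is proved, stated in full; the proofs are below) =====
def Claim_equal_desc_from_ident : Prop := ∀ (ident : String), Dom_desc_from_ident ident → Pre_desc_from_ident ident → Spec_desc_from_ident ident (desc_from_ident ident)

-- ===== LEMMAS AND PROOFS =====

-- character-class disjointness
theorem pv_upper_not_digit {c : Char} (h : pvIsUpper c = true) : pvIsDigit c = false := by
  simp only [pvIsUpper, pvIsDigit, Bool.and_eq_true, decide_eq_true_eq] at *
  by_contra hd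
  simp only [Bool.not_eq_false, Bool.and_eq_true, decide_eq_true_eq] at hd
  exact absurd (le_trans h.1 hd.2) (by decide)

theorem pv_lower_not_digit {c : Char} (h : pvIsLower c = true) : pvIsDigit c = false := by
  simp only [pvIsLower, pvIsDigit, Bool.and_eq_true, decide_eq_true_eq] at *
  by_contra hd
  simp only [Bool.not_eq_false, Bool.and_eq_true, decide_eq_true_eq] at hd
  exact absurd (le_trans h.1 hd.2) (by decide)

theorem pv_lower_not_upper {c : Char} (h : pvIsLower c = true) : pvIsUpper c = false := by
  simp only [pvIsLower, pvIsUpper, Bool.and_eq_true, decide_eq_true_eq] at *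
  by_contra hd
  simp only [Bool.not_eq_false, Bool.and_eq_true, decide_eq_true_eq] at hd
  exact absurd (le_trans h.1 hd.2) (by decide)

theorem pv_ne_underscore_of {c : Char} (h : (pvIsDigit c || pvIsUpper c || pvIsLower c) = true) :
    c ≠ '_' := by
  intro e; subst e; simp [pvIsDigit, pvIsUpper, pvIsLower] at h

theorem pv_all_dropWhile {α : Type} (p q : α → Bool) {l : List α} (h : l.all q = true) :
    (l.dropWhile p).all q = true := by
  rw [List.all_eq_true] at *
  exact fun x hx => h x ((List.dropWhile_sublist p).subset hx)

theorem pv_len_take_drop {α : Type} (p : α → Bool) (l : List α) :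
    (l.takeWhile p).length + (l.dropWhile p).length = l.length := by
  have := congrArg List.length (List.takeWhile_append_dropWhile (p := p) (l := l))
  simpa only [List.length_append] using this

-- unfolding lemma for the well-founded pvFindAll
theorem pvFindAll_cons_some {c : Char} {rest t rest' : List Char}
    (h : pvMatchTok (c :: rest) = some (t, rest')) :
    pvFindAll (c :: rest) = t :: pvFindAll rest' := by
  rw [pvFindAll.eq_def]
  simp only []
  split
  next h' => rw [h] at h'; injection h' with h''; injection h'' with h1 h2; rw [← h1, ← h2]
  next h' => rw [h] at h'; cases h'

-- the core invariant: on valid character lists, B's findall covers the whole input,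
-- and A's split and B's findall agree once underscore tokens are filtered out
theorem pv_split_find : ∀ (n : Nat) (l : List Char), l.length ≤ n →
    l.all (fun c => pvIsDigit c || pvIsUpper c || pvIsLower c || pvIsUnderscore c) = true →
    ((pvFindAll l).map List.length).sum = l.length ∧
    (pvSplitA l).filter (fun w => w ≠ ['_']) = (pvFindAll l).filter (fun t => t.headD ' ' ≠ '_') := by
  intro n
  induction n with
  | zero =>
    intro l hl _
    have : l = [] := List.eq_nil_of_length_eq_zero (Nat.le_zero.mp hl)
    subst this
    simp [pvFindAll, pvSplitA]
  | succ n ih =>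
    intro l hl hv
    match l with
    | [] => simp [pvFindAll, pvSplitA]
    | c :: rest =>
      simp only [List.all_cons, Bool.and_eq_true] at hv
      obtain ⟨hvc, hvr⟩ := hv
      have hlr : rest.length ≤ n := by simpa using hl
      simp only [Bool.or_eq_true] at hvc
      rcases hvc with ((hd | hu) | hlo) | hun
      · -- digit run
        have hne : c ≠ '_' := pv_ne_underscore_of (by simp [hd])
        obtain ⟨ihs, ihf⟩ := ih (rest.dropWhile pvIsDigit)
          (le_trans (List.length_dropWhile_le _ _) hlr) (pv_all_dropWhile _ _ hvr)
        have hm : pvMatchTok (c :: rest)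
            = some (c :: rest.takeWhile pvIsDigit, rest.dropWhile pvIsDigit) := by
          simp [pvMatchTok, hd]
        rw [pvFindAll_cons_some hm]
        have hlen := pv_len_take_drop pvIsDigit rest
        constructor
        · simp only [List.map_cons, List.sum_cons, ihs, List.length_cons]; omega
        · simp [pvSplitA, hd, hne]
          simpa using ihf
      · -- uppercase letter + lowercase run
        have hdf : pvIsDigit c = false := pv_upper_not_digit hu
        have hne : c ≠ '_' := pv_ne_underscore_of (by simp [hu])
        obtain ⟨ihs, ihf⟩ := ih (rest.dropWhile pvIsLower)
          (le_trans (List.length_dropWhile_le _ _) hlr) (pv_all_dropWhile _ _ hvr)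
        have hm : pvMatchTok (c :: rest)
            = some (c :: rest.takeWhile pvIsLower, rest.dropWhile pvIsLower) := by
          simp [pvMatchTok, hdf, hu]
        rw [pvFindAll_cons_some hm]
        have hlen := pv_len_take_drop pvIsLower rest
        constructor
        · simp only [List.map_cons, List.sum_cons, ihs, List.length_cons]; omega
        · simp [pvSplitA, hdf, hu, hne]
          simpa using ihf
      · -- lowercase letter + lowercase run
        have hdf : pvIsDigit c = false := pv_lower_not_digit hlo
        have huf : pvIsUpper c = false := pv_lower_not_upper hlo
        have hne : c ≠ '_' := pv_ne_underscore_of (by simp [hlo])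
        obtain ⟨ihs, ihf⟩ := ih (rest.dropWhile pvIsLower)
          (le_trans (List.length_dropWhile_le _ _) hlr) (pv_all_dropWhile _ _ hvr)
        have hm : pvMatchTok (c :: rest)
            = some (c :: rest.takeWhile pvIsLower, rest.dropWhile pvIsLower) := by
          simp [pvMatchTok, hdf, huf, hlo]
        rw [pvFindAll_cons_some hm]
        have hlen := pv_len_take_drop pvIsLower rest
        constructor
        · simp only [List.map_cons, List.sum_cons, ihs, List.length_cons]; omega
        · simp [pvSplitA, hdf, huf, hlo, hne]
          simpa using ihf
      · -- underscore run
        have hc : c = '_' := by simpa [pvIsUnderscore] using hun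
        subst hc
        obtain ⟨ihs, ihf⟩ := ih (rest.dropWhile pvIsUnderscore)
          (le_trans (List.length_dropWhile_le _ _) hlr) (pv_all_dropWhile _ _ hvr)
        have hm : pvMatchTok ('_' :: rest)
            = some ('_' :: rest.takeWhile pvIsUnderscore, rest.dropWhile pvIsUnderscore) := by
          simp [pvMatchTok, pvIsDigit, pvIsUpper, pvIsLower, pvIsUnderscore]
        rw [pvFindAll_cons_some hm]
        have hlen := pv_len_take_drop pvIsUnderscore rest
        constructor
        · simp only [List.map_cons, List.sum_cons, ihs, List.length_cons]; omega
        · simp [pvSplitA, pvIsDigit, pvIsUpper, pvIsLower, pvIsUnderscore]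
          simpa using ihf

-- ===== VERDICT (by name: the statement is the Claim_ definition above) =====
theorem desc_from_ident_spec : Claim_equal_desc_from_ident := by
  intro ident _ hpre
  obtain ⟨hall, _⟩ := hpre
  obtain ⟨hs, hf⟩ := pv_split_find ident.toList.length ident.toList le_rfl hall
  have hfun : ∀ (ws : List (List Char)),
      (ws.map PySem.Chars.lower).map (fun w => if w ∈ pvAllCaps then PySem.Chars.upper w
        else if w ∈ pvCapitalize then pvCapWordA w else w)
      = ws.map (fun t => pvFmt (PySem.Chars.lower t)) := by
    intro ws
    rw [List.map_map]
    exact List.map_congr_left (fun t _ => by simp [pvFmt, Function.comp])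
  show desc_from_ident ident = desc_from_ident_alt ident
  simp only [desc_from_ident, desc_from_ident_alt, hs, ← hf, hfun, ne_eq, not_true_eq_false,
    if_false]
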